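-- pv_equiv track=rewrite | github.com/hduyanh/python-codes | tanulas/egyetemi_beadandok.py | emelkedolista
-- ===== SOURCE A (Python) =====
-- def emelkedolista(n):
--
--   def emelkedo(n):
--     r = True
--     l1 = [int(i) for i in list(str(n))]
--     if len(l1) < 2:
--       r = False
--     else:
--       for i in range(len(l1) - 1):
--         if l1[i] >= l1[i+1]:
--           r = False
--           break
--     return r
--
--   l2 = [i for i in range(n + 1) if emelkedo(i)]
--   return l2
-- ===== SOURCE B (Python) =====
-- def emelkedolista(n):
--     # Enumerate each nonempty subset of digits 1..9 as a bitmask; a subset with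
--     # at least two digits, read in increasing order, is exactly one number with
--     # strictly increasing digits. Keep those <= n and sort.
--     res = []
--     for mask in range(1, 1 << 9):
--         if mask & (mask - 1) == 0:
--             continue  # fewer than two digits
--         v = 0
--         for d in range(1, 10):
--             if (mask >> (d - 1)) & 1:
--                 v = v * 10 + d
--         if v <= n:
--             res.append(v)
--     res.sort()
--     return res
-- ===== Notes on version B (the rewrite author's own statement) =====
-- stated objective: faster
-- what changed: Instead of testing every number in range(n+1) for strictly increasing digits, B enumerates the strictly-increasing-digit numbers directly as bitmask subsets of the digits one to nine, keeps those below the bound and sorts.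
import Mathlib
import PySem

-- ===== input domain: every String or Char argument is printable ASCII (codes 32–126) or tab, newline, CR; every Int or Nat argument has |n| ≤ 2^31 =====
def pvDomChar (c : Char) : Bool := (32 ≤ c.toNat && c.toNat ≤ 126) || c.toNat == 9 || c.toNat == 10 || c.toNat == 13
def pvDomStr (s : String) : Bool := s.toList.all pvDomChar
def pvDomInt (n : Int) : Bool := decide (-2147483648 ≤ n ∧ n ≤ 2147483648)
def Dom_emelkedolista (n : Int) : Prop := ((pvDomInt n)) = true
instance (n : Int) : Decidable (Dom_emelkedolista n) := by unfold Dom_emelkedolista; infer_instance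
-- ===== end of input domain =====

-- B replaces A's per-number digit test over range(n+1) by direct enumeration of the 502
-- strictly-increasing-digit numbers (bitmask subsets of digits 1..9), filtered by <= n and sorted.

-- ===== PORT A =====
-- the inner 'for i in range(len(l1)-1)' with break, comparing adjacent digits
def pvAdjLoop : List Int → Bool
  | a :: b :: rest => if a ≥ b then false else pvAdjLoop (b :: rest)
  | _ => true

-- int(i) on a single char i; the .getD 0 default is never reached for the chars str(m) yields on m ≥ 0
def pvEmelkedo (m : Int) : Bool :=
  let l1 := (PySem.Int.toChars m).map (fun c => (PySem.Int.ofChars? [c]).getD 0)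
  if l1.length < 2 then false
  else pvAdjLoop l1

def emelkedolista (n : Int) : List Int :=
  (PySem.List.pyRange 0 (n + 1) 1).filter pvEmelkedo

-- ===== PORT B =====
-- v = 0; for d in range(1, 10): if (mask >> (d-1)) & 1: v = v*10 + d
def pvMaskVal (mask : Int) : Int :=
  (PySem.List.pyRange 1 10 1).foldl
    (fun v d => if PySem.Int.band (mask >>> (d - 1).toNat) 1 ≠ 0 then v * 10 + d else v) 0

def emelkedolista_alt (n : Int) : List Int :=
  let res := (PySem.List.pyRange 1 512 1).foldl
    (fun acc mask =>
      if PySem.Int.band mask (mask - 1) = 0 then acc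
      else
        let v := pvMaskVal mask
        if v ≤ n then acc ++ [v] else acc) []
  PySem.List.sorted res (fun x => x)

-- ===== PRECONDITION & SPEC =====
def Spec_emelkedolista (n : Int) (out : List Int) : Prop := out = emelkedolista_alt n
instance (n : Int) (out : List Int) : Decidable (Spec_emelkedolista n out) := by unfold Spec_emelkedolista; infer_instance

-- ===== CLAIM (what is proved, stated in full; the proofs are below) =====
def Claim_equal_emelkedolista : Prop := ∀ (n : Int), Dom_emelkedolista n → Spec_emelkedolista n (emelkedolista n)

-- ===== LEMMAS AND PROOFS =====

-- the 502 numbers with strictly increasing digits, ascending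
def pvLitAll : List Int := [12, 13, 14, 15, 16, 17, 18, 19, 23, 24, 25, 26, 27, 28, 29, 34, 35, 36, 37, 38, 39, 45, 46, 47, 48, 49, 56, 57, 58, 59, 67, 68, 69, 78, 79, 89, 123, 124, 125, 126, 127, 128, 129, 134, 135, 136, 137, 138, 139, 145, 146, 147, 148, 149, 156, 157, 158, 159, 167, 168, 169, 178, 179, 189, 234, 235, 236, 237, 238, 239, 245, 246, 247, 248, 249, 256, 257, 258, 259, 267, 268, 269, 278, 279, 289, 345, 346, 347, 348, 349, 356, 357, 358, 359, 367, 368, 369, 378, 379, 389, 456, 457, 458, 459, 467, 468, 469, 478, 479, 489, 567, 568, 569, 578, 579, 589, 678, 679, 689, 789, 1234, 1235, 1236, 1237, 1238, 1239, 1245, 1246, 1247, 1248, 1249, 1256, 1257, 1258, 1259, 1267, 1268, 1269, 1278, 1279, 1289, 1345, 1346, 1347, 1348, 1349, 1356, 1357, 1358, 1359, 1367, 1368, 1369, 1378, 1379, 1389, 1456, 1457, 1458, 1459, 1467, 1468, 1469, 1478, 1479, 1489, 1567, 1568, 1569, 1578, 1579, 1589, 1678, 1679, 1689, 1789, 2345,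 2346, 2347, 2348, 2349, 2356, 2357, 2358, 2359, 2367, 2368, 2369, 2378, 2379, 2389, 2456, 2457, 2458, 2459, 2467, 2468, 2469, 2478, 2479, 2489, 2567, 2568, 2569, 2578, 2579, 2589, 2678, 2679, 2689, 2789, 3456, 3457, 3458, 3459, 3467, 3468, 3469, 3478, 3479, 3489, 3567, 3568, 3569, 3578, 3579, 3589, 3678, 3679, 3689, 3789, 4567, 4568, 4569, 4578, 4579, 4589, 4678, 4679, 4689, 4789, 5678, 5679, 5689, 5789, 6789, 12345, 12346, 12347, 12348, 12349, 12356, 12357, 12358, 12359, 12367, 12368, 12369, 12378, 12379, 12389, 12456, 12457, 12458, 12459, 12467, 12468, 12469, 12478, 12479, 12489, 12567, 12568, 12569, 12578, 12579, 12589, 12678, 12679, 12689, 12789, 13456, 13457, 13458, 13459, 13467, 13468, 13469, 13478, 13479, 13489, 13567, 13568, 13569, 13578, 13579, 13589, 13678, 13679, 13689, 13789, 14567, 14568, 14569, 14578, 14579, 14589, 14678, 14679, 14689, 14789, 15678, 15679, 15689, 15789, 16789, 23456, 23457, 23458, 23459, 23467, 23468, 23469, 23478, 23479, 23489, 23567,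 23568, 23569, 23578, 23579, 23589, 23678, 23679, 23689, 23789, 24567, 24568, 24569, 24578, 24579, 24589, 24678, 24679, 24689, 24789, 25678, 25679, 25689, 25789, 26789, 34567, 34568, 34569, 34578, 34579, 34589, 34678, 34679, 34689, 34789, 35678, 35679, 35689, 35789, 36789, 45678, 45679, 45689, 45789, 46789, 56789, 123456, 123457, 123458, 123459, 123467, 123468, 123469, 123478, 123479, 123489, 123567, 123568, 123569, 123578, 123579, 123589, 123678, 123679, 123689, 123789, 124567, 124568, 124569, 124578, 124579, 124589, 124678, 124679, 124689, 124789, 125678, 125679, 125689, 125789, 126789, 134567, 134568, 134569, 134578, 134579, 134589, 134678, 134679, 134689, 134789, 135678, 135679, 135689, 135789, 136789, 145678, 145679, 145689, 145789, 146789, 156789, 234567, 234568, 234569, 234578, 234579, 234589, 234678, 234679, 234689, 234789, 235678, 235679, 235689, 235789, 236789, 245678, 245679, 245689, 245789, 246789, 256789, 345678, 345679, 345689, 345789, 346789, 356789, 456789, 1234567, 1234568, 1234569, 1234578, 1234579, 1234589, 1234678, 1234679, 1234689, 1234789, 1235678, 1235679, 1235689, 1235789, 1236789, 1245678, 1245679,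 1245689, 1245789, 1246789, 1256789, 1345678, 1345679, 1345689, 1345789, 1346789, 1356789, 1456789, 2345678, 2345679, 2345689, 2345789, 2346789, 2356789, 2456789, 3456789, 12345678, 12345679, 12345689, 12345789, 12346789, 12356789, 12456789, 13456789, 23456789, 123456789]

def pvGood (m : Int) : Bool := !(PySem.Int.band m (m - 1) = 0)

-- B's generated values, in mask order
def pvRawVal : List Int :=
  ((PySem.List.pyRange 1 512 1).filter pvGood).map pvMaskVal

def pvDigits19 : List ℕ := [1, 2, 3, 4, 5, 6, 7, 8, 9]

-- the same values generated from sublists of [1..9] (sublists order = mask order)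
def pvCand : List Int :=
  ((pvDigits19.sublists).filter (fun r => 2 ≤ r.length)).map
    (fun r => ((Nat.ofDigits 10 r.reverse : ℕ) : Int))

set_option maxRecDepth 100000 in
theorem pvLitAll_chain : pvLitAll.IsChain (· < ·) := by decide

theorem pvLitAll_pw : pvLitAll.Pairwise (· < ·) := pvLitAll_chain.pairwise

set_option maxRecDepth 100000 in
set_option maxHeartbeats 4000000 in
theorem pvSorted_raw : PySem.List.sorted pvRawVal (fun x => x) = pvLitAll := by decide

theorem pvLit_perm_raw : pvLitAll.Perm pvRawVal := pvSorted_raw ▸ PySem.List.sorted_perm pvRawVal (fun x => x) false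

set_option maxRecDepth 100000 in
set_option maxHeartbeats 4000000 in
theorem pvCand_eq_raw : pvCand = pvRawVal := by decide

set_option maxRecDepth 100000 in
set_option maxHeartbeats 4000000 in
theorem pvLit_all_emelkedo : pvLitAll.all (fun x => pvEmelkedo x && decide (0 < x)) = true := by decide

theorem pvLit_mem (x : Int) (hx : x ∈ pvLitAll) : pvEmelkedo x = true ∧ 0 < x := by
  have h := List.all_eq_true.mp pvLit_all_emelkedo x hx
  simpa using h

-- Nat.toDigitsCore in terms of Nat.digits
theorem pvToDigitsCore_eq (f : ℕ) : ∀ (n : ℕ) (acc : List Char), n < f → 0 < n →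
    Nat.toDigitsCore 10 f n acc = ((Nat.digits 10 n).map Nat.digitChar).reverse ++ acc := by
  induction f with
  | zero => intro n acc h _; omega
  | succ f ih =>
    intro n acc hlt hpos
    rw [Nat.toDigitsCore]
    have hd : Nat.digits 10 n = n % 10 :: Nat.digits 10 (n / 10) :=
      Nat.digits_def' (by norm_num) hpos
    by_cases h0 : n / 10 = 0
    · simp [h0, hd]
    · have h1 : 0 < n / 10 := Nat.pos_of_ne_zero h0
      have h2 : n / 10 < f := by
        have := Nat.div_lt_self hpos (by norm_num : (1:ℕ) < 10)
        omega
      simp only [h0, if_false]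
      rw [ih (n / 10) _ h2 h1, hd]
      simp

theorem pvToDigits_eq (n : ℕ) (h : 0 < n) :
    Nat.toDigits 10 n = ((Nat.digits 10 n).map Nat.digitChar).reverse := by
  have := pvToDigitsCore_eq (n + 1) n [] (by omega) h
  simpa [Nat.toDigits] using this

theorem pvCharVal_digitChar (d : ℕ) (h : d < 10) :
    (PySem.Int.ofChars? [Nat.digitChar d]).getD 0 = (d : Int) := by
  interval_cases d <;> decide

theorem pvAdjLoop_iff : ∀ (l : List Int), pvAdjLoop l = true ↔ l.IsChain (· < ·)
  | [] => by simp [pvAdjLoop]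
  | [a] => by simp [pvAdjLoop]
  | a :: b :: rest => by
    by_cases h : a ≥ b
    · simp only [pvAdjLoop, if_pos h, List.isChain_cons_cons]
      simp [show ¬ a < b by omega]
    · simp only [pvAdjLoop, if_neg h, List.isChain_cons_cons, pvAdjLoop_iff (b :: rest)]
      simp [show a < b by omega]

theorem pvMem19 (d : ℕ) (h1 : 1 ≤ d) (h2 : d ≤ 9) : d ∈ pvDigits19 := by
  unfold pvDigits19
  interval_cases d <;> decide

-- core characterisation: A's digit test accepts exactly the members of pvLitAll (among x ≥ 0)
theorem pvEmelkedo_iff (x : Int) (hx : 0 ≤ x) : pvEmelkedo x = true ↔ x ∈ pvLitAll := by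
  constructor
  · intro h
    obtain ⟨m, rfl⟩ : ∃ m : ℕ, x = (m : Int) := ⟨x.toNat, (Int.toNat_of_nonneg hx).symm⟩
    rcases Nat.eq_zero_or_pos m with hm0 | hmpos
    · subst hm0; revert h; decide
    · have htc : PySem.Int.toChars (m : Int) = Nat.toDigits 10 m := by
        simp [PySem.Int.toChars]
      unfold pvEmelkedo at h
      rw [htc, pvToDigits_eq m hmpos] at h
      have hmap : (((Nat.digits 10 m).map Nat.digitChar).reverse).map
          (fun c => (PySem.Int.ofChars? [c]).getD 0) =
          ((Nat.digits 10 m).reverse).map (fun d => Int.ofNat d) := by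
        rw [← List.map_reverse, List.map_map]
        apply List.map_congr_left
        intro d hd
        have hd10 : d < 10 := Nat.digits_lt_base' (List.mem_reverse.mp hd)
        simpa using pvCharVal_digitChar d hd10
      rw [hmap] at h
      have hlen : ¬ ((((Nat.digits 10 m).reverse).map (fun d => Int.ofNat d)).length < 2) := by
        by_contra hc
        rw [if_pos hc] at h
        exact Bool.false_ne_true h
      rw [if_neg hlen] at h
      have hlen2 : 2 ≤ (Nat.digits 10 m).reverse.length := by
        simp only [List.length_map] at hlen; omega
      have hchainZ : ((((Nat.digits 10 m).reverse).map (fun d => Int.ofNat d))).IsChain (· < ·) :=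
        (pvAdjLoop_iff _).mp h
      have hchain : ((Nat.digits 10 m).reverse).IsChain (· < ·) := by
        rw [List.isChain_map] at hchainZ
        exact hchainZ.imp (fun {a b} hab => by exact Int.ofNat_lt.mp hab)
      have hpw : ((Nat.digits 10 m).reverse).Pairwise (· < ·) := hchain.pairwise
      have hne : Nat.digits 10 m ≠ [] := Nat.digits_ne_nil_iff_ne_zero.mpr (by omega)
      obtain ⟨r0, t, hRc⟩ : ∃ r0 t, (Nat.digits 10 m).reverse = r0 :: t := by
        cases hRe : (Nat.digits 10 m).reverse with
        | nil => rw [hRe] at hlen2; simp at hlen2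
        | cons a l => exact ⟨a, l, rfl⟩
      have hr0 : r0 ≠ 0 := by
        have h1 : (Nat.digits 10 m).getLast? = some r0 := by
          rw [← List.head?_reverse, hRc]; rfl
        have h2 : (Nat.digits 10 m).getLast hne = r0 := by
          rwa [List.getLast?_eq_some_getLast hne, Option.some_inj] at h1
        rw [← h2]
        exact Nat.getLast_digit_ne_zero 10 (by omega)
      have hsubset : ∀ d ∈ (Nat.digits 10 m).reverse, d ∈ pvDigits19 := by
        intro d hd
        have hd10 : d < 10 := Nat.digits_lt_base' (List.mem_reverse.mp hd)
        have hd1 : 1 ≤ d := by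
          rw [hRc] at hd hpw
          rcases List.mem_cons.mp hd with rfl | hdt
          · omega
          · have := (List.pairwise_cons.mp hpw).1 d hdt
            omega
        exact pvMem19 d hd1 (by omega)
      have hnodup : ((Nat.digits 10 m).reverse).Nodup := hpw.imp Nat.ne_of_lt
      have hsub : ((Nat.digits 10 m).reverse).Sublist pvDigits19 :=
        List.sublist_of_subperm_of_pairwise
          (List.subperm_of_subset hnodup hsubset)
          (hpw.imp le_of_lt)
          (by decide)
      have hval : Nat.ofDigits 10 ((Nat.digits 10 m).reverse).reverse = m := by
        rw [List.reverse_reverse]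
        exact Nat.ofDigits_digits 10 m
      have hcand : (m : Int) ∈ pvCand := by
        unfold pvCand
        refine List.mem_map.mpr ⟨(Nat.digits 10 m).reverse,
          List.mem_filter.mpr ⟨List.mem_sublists.mpr hsub, by simpa using hlen2⟩, ?_⟩
        rw [hval]
      exact (pvLit_perm_raw.mem_iff).mpr (pvCand_eq_raw ▸ hcand)
  · intro h
    exact (pvLit_mem x h).1

-- two strictly increasing lists with the same members are equal
theorem pvEq_strict {l₁ l₂ : List Int} (h₁ : l₁.Pairwise (· < ·)) (h₂ : l₂.Pairwise (· < ·))
    (hm : ∀ x, x ∈ l₁ ↔ x ∈ l₂) : l₁ = l₂ := by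
  have n₁ : l₁.Nodup := h₁.imp Int.ne_of_lt
  have n₂ : l₂.Nodup := h₂.imp Int.ne_of_lt
  have p : l₁.Perm l₂ :=
    (List.subperm_of_subset n₁ (fun x hx => (hm x).mp hx)).antisymm
      (List.subperm_of_subset n₂ (fun x hx => (hm x).mpr hx))
  exact PySem.List.eq_of_perm_of_pairwise_le p (h₁.imp le_of_lt) (h₂.imp le_of_lt)

theorem emelkedolista_eq_filter (n : Int) :
    emelkedolista n = pvLitAll.filter (fun x => decide (x ≤ n)) := by
  unfold emelkedolista
  apply pvEq_strict
  · exact List.Pairwise.filter _ (PySem.List.pairwise_lt_pyRange_one 0 (n + 1))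
  · exact List.Pairwise.filter _ pvLitAll_pw
  · intro x
    simp only [List.mem_filter, PySem.List.mem_pyRange_one, decide_eq_true_eq]
    constructor
    · rintro ⟨⟨h0, hlt⟩, he⟩
      exact ⟨(pvEmelkedo_iff x h0).mp he, by omega⟩
    · rintro ⟨hmem, hle⟩
      obtain ⟨he, hpos⟩ := pvLit_mem x hmem
      exact ⟨⟨by omega, by omega⟩, he⟩

theorem emelkedolista_alt_eq_filter (n : Int) :
    emelkedolista_alt n = pvLitAll.filter (fun x => decide (x ≤ n)) := by
  unfold emelkedolista_alt
  have hstep : (fun (acc : List Int) (mask : Int) =>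
        if PySem.Int.band mask (mask - 1) = 0 then acc
        else
          let v := pvMaskVal mask
          if v ≤ n then acc ++ [v] else acc) =
      (fun acc mask => if (pvGood mask && decide (pvMaskVal mask ≤ n)) then acc ++ [pvMaskVal mask] else acc) := by
    funext acc mask
    simp only [pvGood]
    by_cases h1 : PySem.Int.band mask (mask - 1) = 0 <;> by_cases h2 : pvMaskVal mask ≤ n <;>
      simp [h1, h2]
  rw [hstep, PySem.List.foldl_append_if (fun mask => pvGood mask && decide (pvMaskVal mask ≤ n)) pvMaskVal]
  simp only [List.nil_append]
  have hres : (List.filter (fun mask => pvGood mask && decide (pvMaskVal mask ≤ n))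
        (PySem.List.pyRange 1 512 1)).map pvMaskVal = pvRawVal.filter (fun v => decide (v ≤ n)) := by
    unfold pvRawVal
    rw [List.filter_map, List.filter_filter]
    simp [Function.comp, Bool.and_comm]
  rw [hres]
  exact PySem.List.sorted_eq_of_perm_of_pairwise_lt _ _ _
    (pvLit_perm_raw.filter _) (List.Pairwise.filter _ pvLitAll_pw)

-- ===== VERDICT (by name: the statement is the Claim_ definition above) =====
theorem emelkedolista_spec : Claim_equal_emelkedolista := by
  intro n _
  unfold Spec_emelkedolista
  rw [emelkedolista_eq_filter, emelkedolista_alt_eq_filter]
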